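-- pv_equiv track=rewrite | github.com/livelifelively/pipeline.loksabha-qna | apps/py/documents/extractors/table_range_detector.py | detect_ranges
-- ===== SOURCE A (Python) =====
-- from typing import List, Set
--
-- def detect_ranges(page_numbers: List[int]) -> List[tuple[int, int]]:
--     """
--     Detects continuous page ranges.
--
--     Args:
--         page_numbers: List of page numbers to analyze
--
--     Returns:
--         List of tuples containing (start_page, end_page) for continuous ranges
--         where start_page != end_page, indicating potential multi-page tables
--     """
--     if not page_numbers:
--         return []
--
--     # Sort page numbers to ensure continuous ranges
--     sorted_pages = sorted(page_numbers)
--     ranges = []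
--     start = sorted_pages[0]
--     prev = start
--
--     for page in sorted_pages[1:]:
--         if page != prev + 1:
--             # End of a range
--             if start != prev:  # Only add ranges with multiple pages
--                 ranges.append((start, prev))
--             start = page
--         prev = page
--
--     # Add the last range if it has multiple pages
--     if start != prev:
--         ranges.append((start, prev))
--
--     return ranges
-- ===== SOURCE B (Python) =====
-- def detect_ranges(page_numbers):
--     """
--     Detects continuous page ranges.
--
--     Staged index-based rewrite: sort, compute the list of cut positions
--     (indices where the sorted sequence is not consecutive), then read each
--     maximal run off the cut boundaries with zip, emitting (first, last)
--     only for runs spanning more than one element.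
--     """
--     s = sorted(page_numbers)
--     n = len(s)
--     cuts = [0] + [i for i in range(1, n) if s[i] != s[i - 1] + 1] + [n]
--     return [(s[l], s[r - 1]) for l, r in zip(cuts, cuts[1:]) if r - l > 1]
-- ===== Notes on version B (the rewrite author's own statement) =====
-- stated objective: alternative
-- what changed: Replaces A's stateful single scan carrying (ranges, start, prev) with a staged index-based computation: first build the list of cut positions (indices i with sorted[i] != sorted[i-1]+1, framed by 0 and n), then read each range off adjacent cut pairs with zip, keeping only pairs spanning more than one element.
import Mathlib
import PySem

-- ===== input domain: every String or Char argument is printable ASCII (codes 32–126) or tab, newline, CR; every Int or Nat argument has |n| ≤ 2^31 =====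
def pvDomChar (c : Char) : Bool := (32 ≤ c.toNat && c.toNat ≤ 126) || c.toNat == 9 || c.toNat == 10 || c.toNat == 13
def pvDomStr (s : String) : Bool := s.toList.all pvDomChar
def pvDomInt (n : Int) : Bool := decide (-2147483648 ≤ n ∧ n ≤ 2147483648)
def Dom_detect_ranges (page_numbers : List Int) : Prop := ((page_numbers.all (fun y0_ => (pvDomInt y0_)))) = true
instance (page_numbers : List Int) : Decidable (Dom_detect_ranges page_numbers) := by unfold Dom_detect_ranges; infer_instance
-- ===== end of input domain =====

-- B replaces A's stateful (ranges, start, prev) scan with a staged, index-based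
-- computation: first the list of cut positions where the sorted sequence breaks,
-- then the ranges read off adjacent cut pairs with zip (objective: alternative).

-- ===== PORT A =====
-- body of A's for-loop over sorted_pages[1:], state (ranges, start, prev)
def drStep (acc : List (Int × Int) × Int × Int) (page : Int) : List (Int × Int) × Int × Int :=
  match acc with
  | (ranges, start, prev) =>
    if page ≠ prev + 1 then
      (if start ≠ prev then ranges ++ [(start, prev)] else ranges, page, page)
    else
      (ranges, start, page)

def detect_ranges (page_numbers : List Int) : List (Int × Int) :=
  match PySem.List.sorted page_numbers (fun x => x) with
  | [] => []                                   -- `if not page_numbers: return []` (empty iff sorted empty)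
  | s0 :: rest =>                              -- start = prev = sorted_pages[0]; loop over sorted_pages[1:]
    match rest.foldl drStep ([], s0, s0) with
    | (ranges, start, prev) =>
      if start ≠ prev then ranges ++ [(start, prev)] else ranges

-- ===== PORT B =====
-- every index handed to s[...] is in range, so pyGetD with default 0 is exact here
def detect_ranges_alt (page_numbers : List Int) : List (Int × Int) :=
  let s := PySem.List.sorted page_numbers (fun x => x)
  let n : Int := s.length
  let cuts := [(0 : Int)] ++ (PySem.List.pyRange 1 n 1).filter
      (fun i => decide (PySem.List.pyGetD s i 0 ≠ PySem.List.pyGetD s (i - 1) 0 + 1)) ++ [n]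
  ((cuts.zip (PySem.List.slice cuts (some 1) none)).filter
      (fun lr => decide (1 < lr.2 - lr.1))).map
    (fun lr => (PySem.List.pyGetD s lr.1 0, PySem.List.pyGetD s (lr.2 - 1) 0))

-- ===== PRECONDITION & SPEC =====
def Spec_detect_ranges (page_numbers : List Int) (out : List (Int × Int)) : Prop := out = detect_ranges_alt page_numbers
instance (page_numbers : List Int) (out : List (Int × Int)) : Decidable (Spec_detect_ranges page_numbers out) := by unfold Spec_detect_ranges; infer_instance

-- ===== CLAIM (what is proved, stated in full; the proofs are below) =====
def Claim_equal_detect_ranges : Prop := ∀ (page_numbers : List Int), Dom_detect_ranges page_numbers → Spec_detect_ranges page_numbers (detect_ranges page_numbers)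

-- ===== LEMMAS AND PROOFS =====

-- length of the consecutive run continuing `prev` at the head of the list
def firstRun : Int → List Int → Nat
  | _, [] => 0
  | prev, b :: t => if b = prev + 1 then firstRun b t + 1 else 0

theorem firstRun_le (prev : Int) (t : List Int) : firstRun prev t ≤ t.length := by
  induction t generalizing prev with
  | nil => simp [firstRun]
  | cons b t ih =>
      simp only [firstRun, List.length_cons]
      split
      · exact Nat.succ_le_succ (ih b)
      · exact Nat.zero_le _

theorem firstRun_getD (prev : Int) (t : List Int) :
    (prev :: t).getD (firstRun prev t) 0 = prev + firstRun prev t := by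
  induction t generalizing prev with
  | nil => simp [firstRun]
  | cons b t ih =>
      by_cases hb : b = prev + 1
      · simp only [firstRun, if_pos hb, List.getD_cons_succ]
        rw [ih b]; omega
      · simp [firstRun, hb]

-- the common reference shape: peel off one maximal consecutive run at a time
def peel : List Int → List (Int × Int)
  | [] => []
  | a :: t =>
    (if 0 < firstRun a t then [(a, (a :: t).getD (firstRun a t) 0)] else []) ++
      peel (t.drop (firstRun a t))
termination_by s => s.length
decreasing_by
  simp only [List.length_cons, List.length_drop]
  omega

-- A's emit after the loop
def drFin : List (Int × Int) × Int × Int → List (Int × Int)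
  | (ranges, start, prev) => if start ≠ prev then ranges ++ [(start, prev)] else ranges

theorem emitRun_self (a : Int) (t : List Int) :
    (if a ≠ (a :: t).getD (firstRun a t) 0 then [(a, (a :: t).getD (firstRun a t) 0)] else []) ++
      peel (t.drop (firstRun a t)) = peel (a :: t) := by
  rw [peel, firstRun_getD]
  rcases Nat.eq_zero_or_pos (firstRun a t) with hk | hk
  · simp [hk]
  · have hne : a ≠ a + (firstRun a t : Int) := by omega
    simp [hne, hk]

theorem lemA (t : List Int) : ∀ (ranges : List (Int × Int)) (start prev : Int),
    drFin (t.foldl drStep (ranges, start, prev)) =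
      ranges ++
        ((if start ≠ (prev :: t).getD (firstRun prev t) 0 then
            [(start, (prev :: t).getD (firstRun prev t) 0)] else []) ++
          peel (t.drop (firstRun prev t))) := by
  induction t with
  | nil =>
      intro ranges start prev
      simp [drFin, firstRun, peel]
      split <;> simp
  | cons b t ih =>
      intro ranges start prev
      by_cases hb : b = prev + 1
      · simp only [List.foldl_cons, drStep, if_neg (by omega : ¬ b ≠ prev + 1)]
        rw [ih ranges start b]
        simp only [firstRun, if_pos hb, List.getD_cons_succ, List.drop_succ_cons]
      · simp only [List.foldl_cons, drStep, if_pos hb]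
        rw [ih _ b b, emitRun_self b t]
        simp only [firstRun, if_neg hb, List.getD_cons_zero, List.drop_zero]
        split_ifs <;> simp

-- Nat-side description of B's staged computation
def cutsNat (s : List Int) : List Nat :=
  (List.range (s.length - 1)).filter (fun k => decide (s.getD (k + 1) 0 ≠ s.getD k 0 + 1))

def fullcuts (s : List Int) : List Nat := 0 :: ((cutsNat s).map (· + 1) ++ [s.length])

def emitN (s : List Int) (c : List Nat) : List (Int × Int) :=
  ((c.zip c.tail).filter (fun lr => decide (lr.1 + 1 < lr.2))).map
    (fun lr => (s.getD lr.1 0, s.getD (lr.2 - 1) 0))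

theorem cutsNat_cons (a b : Int) (t : List Int) :
    cutsNat (a :: b :: t) =
      (if b ≠ a + 1 then [0] else []) ++ (cutsNat (b :: t)).map (· + 1) := by
  simp only [cutsNat, List.length_cons, Nat.add_sub_cancel, List.range_succ_eq_map,
    List.filter_cons, List.getD_cons_succ, List.getD_cons_zero, List.filter_map]
  by_cases hb : b = a + 1 <;>
    · simp [hb, Function.comp_def]
      exact List.map_congr_left fun x _ => rfl

theorem cutsNat_split (t : List Int) : ∀ (a : Int),
    cutsNat (a :: t) =
      if firstRun a t = t.length then [] else
        firstRun a t :: (cutsNat (t.drop (firstRun a t))).map (· + (firstRun a t + 1)) := by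
  induction t with
  | nil => intro a; simp [cutsNat, firstRun]
  | cons b t ih =>
      intro a
      by_cases hb : b = a + 1
      · rw [cutsNat_cons, if_neg (by omega : ¬ b ≠ a + 1), ih b]
        simp only [firstRun, if_pos hb, List.length_cons, List.drop_succ_cons]
        by_cases hk : firstRun b t = t.length
        · simp [hk]
        · rw [if_neg hk, if_neg (by omega : ¬ firstRun b t + 1 = t.length + 1)]
          simp only [List.map_cons, List.map_map, List.nil_append]
          refine congrArg _ (List.map_congr_left ?_)
          intro x _; simp [Function.comp]; omega
      · rw [cutsNat_cons, if_pos hb]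
        simp only [firstRun, if_neg hb, List.length_cons,
          if_neg (by omega : ¬ (0 : Nat) = t.length + 1), List.drop_zero]
        simp

theorem fullcuts_tail_pos (s : List Int) (hs : s ≠ []) :
    ∀ r ∈ (fullcuts s).tail, 1 ≤ r := by
  intro r hr
  simp only [fullcuts, List.tail_cons, List.mem_append, List.mem_map, List.mem_singleton] at hr
  rcases hr with ⟨x, _, rfl⟩ | rfl
  · omega
  · have := List.length_pos_iff.mpr hs; omega

theorem emitN_cons_cons (s : List Int) (x y : Nat) (c : List Nat) :
    emitN s (x :: y :: c) =
      (if x + 1 < y then [(s.getD x 0, s.getD (y - 1) 0)] else []) ++ emitN s (y :: c) := by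
  by_cases h : x + 1 < y <;> simp [emitN, h]

theorem emitN_shift (s : List Int) (m : Nat) (c : List Nat) (h : ∀ r ∈ c.tail, 1 ≤ r) :
    emitN s (c.map (· + m)) = emitN (s.drop m) c := by
  induction c with
  | nil => simp [emitN]
  | cons x c ih =>
      cases c with
      | nil => simp [emitN]
      | cons y rest =>
          have hy : 1 ≤ y := h y (by simp)
          simp only [List.map_cons] at *
          rw [emitN_cons_cons, emitN_cons_cons,
            ih (fun r hr => h r (by simp at hr ⊢; tauto))]
          by_cases hxy : x + 1 < y
          · rw [if_pos hxy, if_pos (by omega : x + m + 1 < y + m)]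
            have h1 : (s.drop m).getD x 0 = s.getD (x + m) 0 := by
              rw [List.getD_eq_getElem?_getD, List.getD_eq_getElem?_getD,
                List.getElem?_drop, Nat.add_comm]
            have h2 : (s.drop m).getD (y - 1) 0 = s.getD (y + m - 1) 0 := by
              rw [List.getD_eq_getElem?_getD, List.getD_eq_getElem?_getD,
                List.getElem?_drop, show m + (y - 1) = y + m - 1 from by omega]
            rw [h1, h2]
          · rw [if_neg hxy, if_neg (by omega : ¬ (x + m + 1 < y + m))]

-- proof-side copy of B's final Int-valued emission, over a cast cut list
theorem emit_cast (s : List Int) (c : List Nat) (h : ∀ r ∈ c.tail, 1 ≤ r) :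
    (((c.map (fun k : Nat => (k : Int))).zip ((c.map (fun k : Nat => (k : Int))).tail)).filter
        (fun lr => decide (1 < lr.2 - lr.1))).map
      (fun lr => (PySem.List.pyGetD s lr.1 0, PySem.List.pyGetD s (lr.2 - 1) 0)) = emitN s c := by
  induction c with
  | nil => simp [emitN]
  | cons x c ih =>
      cases c with
      | nil => simp [emitN]
      | cons y rest =>
          have hy : 1 ≤ y := h y (by simp)
          rw [emitN_cons_cons]
          have hrest := ih (fun r hr => h r (by simp at hr ⊢; tauto))
          simp only [List.map_cons, List.tail_cons] at hrest ⊢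
          simp only [List.zip_cons_cons, List.filter_cons]
          by_cases hxy : x + 1 < y
          · have hc : decide (1 < (y : Int) - (x : Int)) = true := by simp; omega
            rw [hc]
            have h2 : (y : Int) - 1 = ((y - 1 : Nat) : Int) := by omega
            simp [h2, hxy, hrest]
          · have hc : decide (1 < (y : Int) - (x : Int)) = false := by simp; omega
            rw [hc]
            simp [hxy, hrest]

-- B's port, rewritten to the Nat-side description (s ≠ [])
theorem altB (p : List Int) (s : List Int) (hs : s = PySem.List.sorted p (fun x => x))
    (hne : s ≠ []) : detect_ranges_alt p = emitN s (fullcuts s) := by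
  simp only [detect_ranges_alt, ← hs]
  have hlen : ((s.length : Int) - 1).toNat = s.length - 1 := by omega
  have hrange : (PySem.List.pyRange 1 (s.length : Int) 1).filter
      (fun i => decide (PySem.List.pyGetD s i 0 ≠ PySem.List.pyGetD s (i - 1) 0 + 1)) =
      (cutsNat s).map (fun k : Nat => 1 + (k : Int)) := by
    rw [PySem.List.pyRange_one, hlen, List.filter_map]
    refine congrArg _ (List.filter_congr ?_)
    intro k _
    show decide (PySem.List.pyGetD s (1 + (k : Int)) 0 ≠ PySem.List.pyGetD s (1 + (k : Int) - 1) 0 + 1)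
        = decide (s.getD (k + 1) 0 ≠ s.getD k 0 + 1)
    rw [show (1 : Int) + (k : Int) - 1 = ((k : Nat) : Int) from by omega,
      show (1 : Int) + (k : Int) = ((k + 1 : Nat) : Int) from by omega,
      PySem.List.pyGetD_natCast, PySem.List.pyGetD_natCast]
  have hcuts : [(0 : Int)] ++ (PySem.List.pyRange 1 (s.length : Int) 1).filter
      (fun i => decide (PySem.List.pyGetD s i 0 ≠ PySem.List.pyGetD s (i - 1) 0 + 1)) ++
      [(s.length : Int)] = (fullcuts s).map (fun k : Nat => (k : Int)) := by
    rw [hrange]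
    simp only [fullcuts, List.map_cons, List.map_append, List.map_map, Nat.cast_zero,
      List.cons_append, List.nil_append]
    congr 1
    congr 1
    exact List.map_congr_left fun x _ => by simp [Function.comp]; omega
  rw [hcuts, PySem.List.slice_from_one]
  exact emit_cast s (fullcuts s) (fullcuts_tail_pos s hne)

theorem mainB (n : Nat) : ∀ s : List Int, s.length ≤ n → emitN s (fullcuts s) = peel s := by
  induction n with
  | zero =>
      intro s hs
      have : s = [] := List.length_eq_zero_iff.mp (Nat.le_zero.mp hs)
      subst this
      simp [emitN, fullcuts, cutsNat, peel]
  | succ n ih =>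
      intro s hs
      match s with
      | [] => simp [emitN, fullcuts, cutsNat, peel]
      | a :: t =>
        have hk := firstRun_le a t
        by_cases hkt : firstRun a t = t.length
        · have hcn : cutsNat (a :: t) = [] := by rw [cutsNat_split, if_pos hkt]
          have hfc : fullcuts (a :: t) = [0, t.length + 1] := by
            simp [fullcuts, hcn]
          rw [hfc, peel]
          have hdrop : t.drop (firstRun a t) = [] := by
            rw [hkt]; simp
          rw [hdrop]
          have ht0 : 0 < firstRun a t → t ≠ [] := by
            intro h0 hnil; subst hnil; simp [firstRun] at h0
          by_cases h0 : 0 < firstRun a t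
          · have hc : (0 : Nat) + 1 < t.length + 1 := by omega
            simp [emitN, hc, peel, hkt, ht0 h0]
          · have hc : ¬ ((0 : Nat) + 1 < t.length + 1) := by omega
            simp [emitN, hc, peel, h0]
        · have hklt : firstRun a t < t.length := lt_of_le_of_ne hk hkt
          set k := firstRun a t with hkdef
          have hrest : (t.drop k) ≠ [] := by
            intro hnil
            have := List.length_drop (l := t) (i := k)
            rw [hnil] at this; simp at this; omega
          have hfc : fullcuts (a :: t) = 0 :: (fullcuts (t.drop k)).map (· + (k + 1)) := by
            have hcs : cutsNat (a :: t) = k :: (cutsNat (t.drop k)).map (· + (k + 1)) := by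
              rw [cutsNat_split, if_neg hkt]
            simp only [fullcuts, hcs, List.map_cons, List.map_append, List.map_map,
              List.length_cons, List.length_drop]
            have e2 : t.length - k + (k + 1) = t.length + 1 := by omega
            have hmapeq : (cutsNat (t.drop k)).map ((fun x => x + 1) ∘ fun x => x + (k + 1))
                = (cutsNat (t.drop k)).map ((fun x => x + (k + 1)) ∘ fun x => x + 1) :=
              List.map_congr_left fun x _ => by simp [Function.comp]; omega
            simp only [List.map_nil, Nat.zero_add, e2, hmapeq, List.cons_append]
          rw [hfc]
          have hM : (fullcuts (t.drop k)).map (· + (k + 1)) =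
              (k + 1) :: ((cutsNat (t.drop k)).map (· + 1) ++ [(t.drop k).length]).map (· + (k + 1)) := by
            rw [fullcuts]; simp
          rw [hM, emitN_cons_cons, ← hM, emitN_shift _ _ _ (fullcuts_tail_pos _ hrest)]
          rw [List.drop_succ_cons]
          rw [ih (t.drop k) (by rw [List.length_drop]; have hs' := hs; simp at hs'; omega)]
          rw [peel]
          by_cases h0 : 0 < k
          · rw [if_pos (show 0 + 1 < k + 1 by omega), if_pos (show 0 < firstRun a t from h0)]
            simp [← hkdef]
          · rw [if_neg (show ¬ (0 + 1 < k + 1) by omega), if_neg (show ¬ 0 < firstRun a t from h0)]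

-- ===== VERDICT (by name: the statement is the Claim_ definition above) =====
theorem detect_ranges_spec : Claim_equal_detect_ranges := by
  intro p _
  unfold Spec_detect_ranges
  cases hs : PySem.List.sorted p (fun x => x) with
  | nil =>
      simp only [detect_ranges, detect_ranges_alt, hs]
      norm_num [PySem.List.pyRange_one_eq_nil, PySem.List.slice_from_one]
  | cons s0 rest =>
      have hA : detect_ranges p = peel (s0 :: rest) := by
        simp only [detect_ranges, hs]
        rcases hf : rest.foldl drStep ([], s0, s0) with ⟨r, st, pv⟩
        have h1 : drFin (rest.foldl drStep ([], s0, s0)) = peel (s0 :: rest) := by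
          rw [lemA, List.nil_append, emitRun_self]
        rw [hf] at h1
        simpa [drFin] using h1
      have hB : detect_ranges_alt p = peel (s0 :: rest) := by
        rw [altB p (s0 :: rest) hs.symm (by simp),
          mainB (s0 :: rest).length (s0 :: rest) le_rfl]
      rw [hA, hB]
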